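-- pv_equiv track=rewrite | github.com/webwizard-08/Projects-and-Interview-Question-Hacktoberfest2025 | Graph_Questions/Isolated_Cells.py | countIsolated
-- ===== SOURCE A (Python) =====
-- from collections import deque
--
-- def countIsolated(grid, n, m):
--     q = deque()
--
--     # Add boundary land cells to queue
--     for i in range(n):
--         for j in (0, m - 1):
--             if 0 <= j < m and grid[i][j] == 1:
--                 q.append((i, j))
--                 grid[i][j] = 0
--     for j in range(m):
--         for i in (0, n - 1):
--             if 0 <= i < n and grid[i][j] == 1:
--                 q.append((i, j))
--                 grid[i][j] = 0
--
--     # Directions: up, down, left, right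
--     dirs = [(1,0), (-1,0), (0,1), (0,-1)]
--
--     # BFS to mark all reachable land from boundary
--     while q:
--         x, y = q.popleft()
--         for dx, dy in dirs:
--             nx, ny = x + dx, y + dy
--             if 0 <= nx < n and 0 <= ny < m and grid[nx][ny] == 1:
--                 grid[nx][ny] = 0
--                 q.append((nx, ny))
--
--     # Count remaining trapped land cells
--     trapped = 0
--     for i in range(n):
--         for j in range(m):
--             if grid[i][j] == 1:
--                 trapped += 1
--
--     return trapped
-- ===== SOURCE B (Python) =====
-- def countIsolated(grid, n, m):
--     # Worklist-free fixed-point label propagation: a boolean "reachable" matrix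
--     # seeded at boundary land cells is grown by repeated full-grid sweeps until
--     # a sweep changes nothing; no queue/stack, and grid is NOT mutated.
--     reach = [[grid[i][j] == 1 and (i == 0 or i == n - 1 or j == 0 or j == m - 1)
--               for j in range(m)] for i in range(n)]
--     changed = True
--     while changed:
--         changed = False
--         for i in range(n):
--             for j in range(m):
--                 if grid[i][j] == 1 and not reach[i][j] and (
--                         (i > 0 and reach[i - 1][j]) or
--                         (i + 1 < n and reach[i + 1][j]) or
--                         (j > 0 and reach[i][j - 1]) or
--                         (j + 1 < m and reach[i][j + 1])):
--                     reach[i][j] = True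
--                     changed = True
--     return sum(1 for i in range(n) for j in range(m)
--                if grid[i][j] == 1 and not reach[i][j])
-- ===== Notes on version B (the rewrite author's own statement) =====
-- stated objective: alternative
-- what changed: Replaces the multi-source BFS worklist (queue of pending cells, grid zeroed in place) by worklist-free fixed-point label propagation: a separate boolean reachability matrix seeded at boundary land cells is grown by repeated full-grid sweeps until a sweep changes nothing, and the grid is never mutated (A zeroes reachable cells in place; the equivalence is about the return value).
import Mathlib
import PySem

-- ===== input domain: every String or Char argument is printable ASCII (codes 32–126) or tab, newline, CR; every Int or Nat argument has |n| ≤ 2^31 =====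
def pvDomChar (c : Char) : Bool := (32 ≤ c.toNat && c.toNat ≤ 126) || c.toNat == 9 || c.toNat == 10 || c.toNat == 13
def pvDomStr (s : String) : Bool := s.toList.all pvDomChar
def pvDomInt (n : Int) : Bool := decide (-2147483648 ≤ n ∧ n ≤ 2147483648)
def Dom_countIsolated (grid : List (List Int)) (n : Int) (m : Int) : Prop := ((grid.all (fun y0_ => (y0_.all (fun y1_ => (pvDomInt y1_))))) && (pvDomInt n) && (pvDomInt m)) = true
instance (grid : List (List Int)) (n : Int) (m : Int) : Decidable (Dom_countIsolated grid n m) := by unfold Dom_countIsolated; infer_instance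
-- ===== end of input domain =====

-- B replaces A's multi-source BFS worklist by worklist-free fixed-point label propagation:
-- a separate boolean reachability matrix seeded at boundary land cells is grown by repeated
-- full-grid sweeps until a sweep changes nothing; same return value.  A zeroes reachable
-- cells of `grid` in place while B never mutates it — the theorem below is about the
-- return value only.

-- ===== PORT A =====
-- grid[i][j] read / write; every access either program performs is guarded to nonnegative
-- in-range indices inside Pre_, where pyGetD/pySetD are exact Python indexing.
def cellAt (g : List (List Int)) (i j : Int) : Int :=
  PySem.List.pyGetD (PySem.List.pyGetD g i []) j 0

def setCell (g : List (List Int)) (i j v : Int) : List (List Int) :=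
  PySem.List.pySetD g i (PySem.List.pySetD (PySem.List.pyGetD g i []) j v)

-- number of cells equal to 1; used only as the fuel (totality guard) of A's BFS loop
def ones (g : List (List Int)) : Nat := (g.map (fun r => r.countP (fun v => v = 1))).sum

-- for i in range(n): for j in (0, m-1): if 0 <= j < m and grid[i][j] == 1: push & zero
def seedColsA (m : Int) (s : List (List Int) × List (Int × Int)) (i : Int) :
    List (List Int) × List (Int × Int) :=
  [(0 : Int), m - 1].foldl
    (fun s j => if 0 ≤ j ∧ j < m ∧ cellAt s.1 i j = 1
                then (setCell s.1 i j 0, s.2 ++ [(i, j)]) else s) s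

-- for j in range(m): for i in (0, n-1): if 0 <= i < n and grid[i][j] == 1: push & zero
def seedRowsA (n : Int) (s : List (List Int) × List (Int × Int)) (j : Int) :
    List (List Int) × List (Int × Int) :=
  [(0 : Int), n - 1].foldl
    (fun s i => if 0 ≤ i ∧ i < n ∧ cellAt s.1 i j = 1
                then (setCell s.1 i j 0, s.2 ++ [(i, j)]) else s) s

-- body of `for dx, dy in dirs: ...`
def stepA (n m x y : Int) (s : List (List Int) × List (Int × Int)) (d : Int × Int) :
    List (List Int) × List (Int × Int) :=
  let nx := x + d.1
  let ny := y + d.2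
  if 0 ≤ nx ∧ nx < n ∧ 0 ≤ ny ∧ ny < m ∧ cellAt s.1 nx ny = 1
  then (setCell s.1 nx ny 0, s.2 ++ [(nx, ny)]) else s

-- while q: x, y = q.popleft(); ...   (fuel is a totality guard only; the caller passes
-- q.length + ones g, which the proofs show never runs out)
def bfsA (n m : Int) : Nat → List (List Int) → List (Int × Int) → List (List Int)
  | 0, g, _ => g
  | _, g, [] => g
  | fuel + 1, g, (x, y) :: qs =>
      let s := [((1 : Int), (0 : Int)), (-1, 0), (0, 1), (0, -1)].foldl (stepA n m x y) (g, qs)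
      bfsA n m fuel s.1 s.2

-- A's trapped-count double loop
def countLand (n m : Int) (g : List (List Int)) : Int :=
  (PySem.List.pyRange 0 n 1).foldl
    (fun acc i => (PySem.List.pyRange 0 m 1).foldl
      (fun acc j => if cellAt g i j = 1 then acc + 1 else acc) acc) 0

def countIsolated (grid : List (List Int)) (n : Int) (m : Int) : Int :=
  let s := (PySem.List.pyRange 0 n 1).foldl (seedColsA m) (grid, [])
  let s := (PySem.List.pyRange 0 m 1).foldl (seedRowsA n) s
  let g := bfsA n m (s.2.length + ones s.1) s.1 s.2
  countLand n m g

-- ===== PORT B =====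
-- reach[i][j] read / write (every access B performs is guarded to nonnegative in-range
-- indices, where pyGetD/pySetD are exact Python indexing)
def rAt (r : List (List Bool)) (i j : Int) : Bool :=
  PySem.List.pyGetD (PySem.List.pyGetD r i []) j false

def rSet (r : List (List Bool)) (i j : Int) (v : Bool) : List (List Bool) :=
  PySem.List.pySetD r i (PySem.List.pySetD (PySem.List.pyGetD r i []) j v)

-- the seed comprehension: boundary land cells start reachable
def seedMat (grid : List (List Int)) (n m : Int) : List (List Bool) :=
  (PySem.List.pyRange 0 n 1).map (fun i =>
    (PySem.List.pyRange 0 m 1).map (fun j =>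
      decide (cellAt grid i j = 1 ∧ (i = 0 ∨ i = n - 1 ∨ j = 0 ∨ j = m - 1))))

-- the sweep body's guard: unreached land cell with a reached orthogonal neighbour
def guardB (grid : List (List Int)) (n m : Int) (r : List (List Bool)) (i j : Int) : Bool :=
  decide (cellAt grid i j = 1) && !(rAt r i j) &&
    ((decide (0 < i) && rAt r (i - 1) j) || (decide (i + 1 < n) && rAt r (i + 1) j) ||
     (decide (0 < j) && rAt r i (j - 1)) || (decide (j + 1 < m) && rAt r i (j + 1)))

def sweepCell (grid : List (List Int)) (n m : Int) (s : List (List Bool) × Bool) (i j : Int) :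
    List (List Bool) × Bool :=
  if guardB grid n m s.1 i j then (rSet s.1 i j true, true) else s

-- one full sweep = the two nested for loops of the while body (changed starts False)
def sweepB (grid : List (List Int)) (n m : Int) (r : List (List Bool)) :
    List (List Bool) × Bool :=
  (PySem.List.pyRange 0 n 1).foldl
    (fun s i => (PySem.List.pyRange 0 m 1).foldl (fun s j => sweepCell grid n m s i j) s)
    (r, false)

-- while changed: ...  (fuel is a totality guard only; the caller passes n*m+1 sweeps,
-- which the proofs show reach the fixpoint before running out)
def loopB (grid : List (List Int)) (n m : Int) : Nat → List (List Bool) → List (List Bool)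
  | 0, r => r
  | fuel + 1, r =>
      let s := sweepB grid n m r
      if s.2 then loopB grid n m fuel s.1 else s.1

def countIsolated_alt (grid : List (List Int)) (n : Int) (m : Int) : Int :=
  let r := loopB grid n m (n.toNat * m.toNat + 1) (seedMat grid n m)
  (PySem.List.pyRange 0 n 1).foldl
    (fun acc i => (PySem.List.pyRange 0 m 1).foldl
      (fun acc j => if cellAt grid i j = 1 ∧ rAt r i j = false then acc + 1 else acc) acc) 0

-- ===== PRECONDITION & SPEC =====
-- Pre_ is exactly the inputs on which the Python A returns: with n > 0 and m > 0 both programs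
-- index the first n rows at columns < m, so those rows must exist and be long enough; with
-- n ≤ 0 or m ≤ 0 every access is guarded away and A returns 0.
def Pre_countIsolated (grid : List (List Int)) (n : Int) (m : Int) : Prop :=
  n ≤ 0 ∨ m ≤ 0 ∨ (n ≤ (grid.length : Int) ∧ ∀ i ∈ List.range n.toNat, m ≤ ((grid.getD i []).length : Int))
instance (grid : List (List Int)) (n : Int) (m : Int) : Decidable (Pre_countIsolated grid n m) := by
  unfold Pre_countIsolated; infer_instance

def pvWitness_countIsolated : List (List Int) × Int × Int :=
  ([[1, 1, 0], [0, 1, 0], [0, 0, 1]], 3, 3)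

def Spec_countIsolated (grid : List (List Int)) (n : Int) (m : Int) (out : Int) : Prop := out = countIsolated_alt grid n m
instance (grid : List (List Int)) (n : Int) (m : Int) (out : Int) : Decidable (Spec_countIsolated grid n m out) := by unfold Spec_countIsolated; infer_instance

-- ===== CLAIM (what is proved, stated in full; the proofs are below) =====
def Claim_equal_countIsolated : Prop := ∀ (grid : List (List Int)) (n : Int) (m : Int), Dom_countIsolated grid n m → Pre_countIsolated grid n m → Spec_countIsolated grid n m (countIsolated grid n m)

-- ===== LEMMAS AND PROOFS =====

-- positions, boundary, adjacency, reachability from the boundary through 1-cells of g0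
def inb (n m : Int) (p : Int × Int) : Prop := 0 ≤ p.1 ∧ p.1 < n ∧ 0 ≤ p.2 ∧ p.2 < m

def bnd (n m : Int) (p : Int × Int) : Prop := p.1 = 0 ∨ p.1 = n - 1 ∨ p.2 = 0 ∨ p.2 = m - 1

def adjc (p q : Int × Int) : Prop :=
  q = (p.1 + 1, p.2) ∨ q = (p.1 - 1, p.2) ∨ q = (p.1, p.2 + 1) ∨ q = (p.1, p.2 - 1)

inductive Reach (g0 : List (List Int)) (n m : Int) : Int × Int → Prop
  | seed (p : Int × Int) (h1 : inb n m p) (h2 : bnd n m p) (h3 : cellAt g0 p.1 p.2 = 1) :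
      Reach g0 n m p
  | step (p q : Int × Int) (h : Reach g0 n m p) (ha : adjc p q) (h1 : inb n m q)
      (h3 : cellAt g0 q.1 q.2 = 1) : Reach g0 n m q

-- shape facts derived from Pre_
def ShapeOK (g0 : List (List Int)) (n m : Int) : Prop :=
  ∀ i : Int, 0 ≤ i → i < n → 0 < m → i.toNat < g0.length ∧ m ≤ ((g0.getD i.toNat []).length : Int)

-- current grid has the same row lengths as the original
def Sh (g0 g : List (List Int)) : Prop :=
  g.length = g0.length ∧ ∀ k : Nat, (g.getD k []).length = (g0.getD k []).length

-- every in-range cell is unchanged, or a boundary-reachable cell zeroed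
def GInv (g0 : List (List Int)) (n m : Int) (g : List (List Int)) : Prop :=
  ∀ p : Int × Int, inb n m p →
    (cellAt g p.1 p.2 = cellAt g0 p.1 p.2 ∨ (Reach g0 n m p ∧ cellAt g p.1 p.2 = 0))

def Marked (g0 g : List (List Int)) (p : Int × Int) : Prop :=
  cellAt g0 p.1 p.2 = 1 ∧ cellAt g p.1 p.2 = 0

def NbrsZero (g0 : List (List Int)) (n m : Int) (g : List (List Int)) (p : Int × Int) : Prop :=
  ∀ q : Int × Int, adjc p q → inb n m q → cellAt g0 q.1 q.2 = 1 → cellAt g q.1 q.2 = 0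

-- A-side pending invariant: queue elements are marked reachable cells
def PendA (g0 : List (List Int)) (n m : Int) (g : List (List Int)) (q : List (Int × Int)) : Prop :=
  ∀ p ∈ q, inb n m p ∧ cellAt g0 p.1 p.2 = 1 ∧ cellAt g p.1 p.2 = 0 ∧ Reach g0 n m p

-- A-side closure: every marked cell is still queued or fully processed
def ClosedA (g0 : List (List Int)) (n m : Int) (g : List (List Int)) (q : List (Int × Int)) : Prop :=
  ∀ p : Int × Int, inb n m p → Marked g0 g p → (p ∈ q ∨ NbrsZero g0 n m g p)

-- A-side: boundary 1-cells already marked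
def BndMk (g0 : List (List Int)) (n m : Int) (g : List (List Int)) : Prop :=
  ∀ p : Int × Int, inb n m p → bnd n m p → cellAt g0 p.1 p.2 = 1 → cellAt g p.1 p.2 = 0

-- final characterisation of A's grid
def Final (g0 : List (List Int)) (n m : Int) (g : List (List Int)) : Prop :=
  ∀ p : Int × Int, inb n m p →
    (Reach g0 n m p → cellAt g p.1 p.2 = 0) ∧ (¬ Reach g0 n m p → cellAt g p.1 p.2 = cellAt g0 p.1 p.2)

-- ---- primitive cell lemmas (A side) ----
lemma cellAt_nonneg_eq (g : List (List Int)) (i j : Int) (hi : 0 ≤ i) (hj : 0 ≤ j) :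
    cellAt g i j = (g.getD i.toNat []).getD j.toNat 0 := by
  simp [cellAt, PySem.List.pyGetD_of_nonneg _ _ hi, PySem.List.pyGetD_of_nonneg _ _ hj]

lemma setCell_nonneg_eq (g : List (List Int)) (i j v : Int) (hi : 0 ≤ i) (hj : 0 ≤ j) :
    setCell g i j v = g.set i.toNat ((g.getD i.toNat []).set j.toNat v) := by
  simp [setCell, PySem.List.pySetD_of_nonneg _ _ hi, PySem.List.pySetD_of_nonneg _ _ hj,
    PySem.List.pyGetD_of_nonneg _ _ hi]

lemma sum_set_nat (l : List Nat) (i x : Nat) (h : i < l.length) :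
    (l.set i x).sum + l[i] = l.sum + x := by
  induction l generalizing i with
  | nil => simp at h
  | cons a t ih =>
    cases i with
    | zero => simp [List.set]; omega
    | succ k =>
      simp only [List.set, List.sum_cons, List.getElem_cons_succ]
      have := ih k (by simpa using h)
      omega

lemma getD_set_self_nat {α : Type} (l : List α) (k : Nat) (a d : α) (h : k < l.length) :
    (l.set k a).getD k d = a := by
  rw [List.getD_eq_getElem _ d (by simpa using h)]
  exact List.getElem_set_self _

lemma getD_set_ne_nat {α : Type} (l : List α) (k k' : Nat) (a d : α) (h : k ≠ k') :
    (l.set k a).getD k' d = l.getD k' d := by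
  unfold List.getD
  rw [List.getElem?_set_ne h]

lemma Sh_setCell (g0 g : List (List Int)) (i j v : Int) (hi : 0 ≤ i) (hj : 0 ≤ j)
    (hsh : Sh g0 g) : Sh g0 (setCell g i j v) := by
  rw [setCell_nonneg_eq g i j v hi hj]
  obtain ⟨hl, hr⟩ := hsh
  refine ⟨by simpa using hl, fun k => ?_⟩
  by_cases hk : k = i.toNat
  · subst hk
    by_cases hlt : i.toNat < g.length
    · rw [getD_set_self_nat _ _ _ _ hlt, List.length_set]
      exact hr i.toNat
    · rw [List.set_eq_of_length_le (by omega)]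
      exact hr i.toNat
  · rw [getD_set_ne_nat _ _ _ _ _ (fun h => hk h.symm)]
    exact hr k

lemma cellAt_setCell_self (g0 g : List (List Int)) (n m : Int) (hok : ShapeOK g0 n m)
    (hsh : Sh g0 g) (i j v : Int) (h : inb n m (i, j)) :
    cellAt (setCell g i j v) i j = v := by
  obtain ⟨h1, h2, h3, h4⟩ := h
  obtain ⟨hrow, hlen⟩ := hok i h1 h2 (by omega)
  have hig : i.toNat < g.length := by rw [hsh.1]; exact hrow
  have hjr : j.toNat < (g.getD i.toNat []).length := by
    have := hsh.2 i.toNat; omega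
  rw [cellAt_nonneg_eq _ _ _ h1 h3, setCell_nonneg_eq g i j v h1 h3,
    getD_set_self_nat _ _ _ _ hig, getD_set_self_nat _ _ _ _ hjr]

lemma cellAt_setCell_ne (g : List (List Int)) (i j v i' j' : Int)
    (hi : 0 ≤ i) (hj : 0 ≤ j) (hi' : 0 ≤ i') (hj' : 0 ≤ j')
    (hne : (i', j') ≠ (i, j)) :
    cellAt (setCell g i j v) i' j' = cellAt g i' j' := by
  rw [cellAt_nonneg_eq _ _ _ hi' hj', cellAt_nonneg_eq _ _ _ hi' hj',
    setCell_nonneg_eq g i j v hi hj]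
  by_cases hii : i'.toNat = i.toNat
  · have hieq : i' = i := by omega
    have hjj : j.toNat ≠ j'.toNat := by
      intro hcon
      exact hne (by rw [hieq]; congr 1; omega)
    by_cases hlt : i.toNat < g.length
    · rw [hii, getD_set_self_nat _ _ _ _ hlt, getD_set_ne_nat _ _ _ _ _ hjj]
    · rw [List.set_eq_of_length_le (by omega)]
  · rw [getD_set_ne_nat _ _ _ _ _ (fun h => hii h.symm)]

lemma ones_setCell (g0 g : List (List Int)) (n m : Int) (hok : ShapeOK g0 n m)
    (hsh : Sh g0 g) (i j : Int) (h : inb n m (i, j)) (h1 : cellAt g i j = 1) :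
    ones (setCell g i j 0) + 1 = ones g := by
  obtain ⟨hi, h2, hj, h4⟩ := h
  obtain ⟨hrow, hlen⟩ := hok i hi h2 (by omega)
  have hig : i.toNat < g.length := by rw [hsh.1]; exact hrow
  have hjr : j.toNat < (g.getD i.toNat []).length := by
    have := hsh.2 i.toNat; omega
  rw [cellAt_nonneg_eq _ _ _ hi hj] at h1
  rw [setCell_nonneg_eq g i j 0 hi hj]
  unfold ones
  rw [List.map_set]
  have hmlen : i.toNat < (g.map (fun r => r.countP (fun v => decide (v = 1)))).length := by
    simpa using hig
  have hsum := sum_set_nat (g.map (fun r => r.countP (fun v => decide (v = 1)))) i.toNat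
    (((g.getD i.toNat []).set j.toNat 0).countP (fun v => decide (v = 1))) hmlen
  have hga : g.getD i.toNat [] = g[i.toNat] := List.getD_eq_getElem g [] hig
  have hcp : ((g.getD i.toNat []).set j.toNat 0).countP (fun v => decide (v = 1)) + 1
      = (g.getD i.toNat []).countP (fun v => decide (v = 1)) := by
    rw [List.countP_set hjr]
    have hb : (g.getD i.toNat [])[j.toNat] = 1 := by
      rw [List.getD_eq_getElem (g.getD i.toNat []) 0 hjr] at h1; exact h1
    have hpos : 0 < (g.getD i.toNat []).countP (fun v => decide (v = 1)) :=
      List.countP_pos_iff.mpr ⟨1, by rw [← hb]; exact List.getElem_mem hjr, by simp⟩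
    split_ifs with h5 h6 <;> simp_all
  have hget : (g.map (fun r => r.countP (fun v => decide (v = 1))))[i.toNat]
      = g[i.toNat].countP (fun v => decide (v = 1)) := by simp
  rw [hget, ← hga] at hsum
  omega

lemma reach_one (g0 : List (List Int)) (n m : Int) (p : Int × Int) (h : Reach g0 n m p) :
    cellAt g0 p.1 p.2 = 1 ∧ inb n m p := by
  cases h with
  | seed p h1 h2 h3 => exact ⟨h3, h1⟩
  | step p q h ha h1 h3 => exact ⟨h3, h1⟩

-- zero cells are preserved
def ZP (n m : Int) (g g' : List (List Int)) : Prop :=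
  ∀ p : Int × Int, inb n m p → cellAt g p.1 p.2 = 0 → cellAt g' p.1 p.2 = 0

-- A-side bundled invariant
def InvA (g0 : List (List Int)) (n m : Int) (s : List (List Int) × List (Int × Int)) : Prop :=
  Sh g0 s.1 ∧ GInv g0 n m s.1 ∧ PendA g0 n m s.1 s.2 ∧ ClosedA g0 n m s.1 s.2

lemma ZP_trans (n m : Int) (g1 g2 g3 : List (List Int)) (h1 : ZP n m g1 g2) (h2 : ZP n m g2 g3) :
    ZP n m g1 g3 := fun p hp h0 => h2 p hp (h1 p hp h0)

-- the common effect of marking one in-range 1-cell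
lemma mark_main (g0 : List (List Int)) (n m : Int) (hok : ShapeOK g0 n m)
    (g : List (List Int)) (q : List (Int × Int)) (p : Int × Int)
    (hin : inb n m p) (hc : cellAt g p.1 p.2 = 1)
    (hr : cellAt g0 p.1 p.2 = 1 → Reach g0 n m p)
    (hsh : Sh g0 g) (hG : GInv g0 n m g) (hP : PendA g0 n m g q) :
    cellAt g0 p.1 p.2 = 1 ∧
    Sh g0 (setCell g p.1 p.2 0) ∧ GInv g0 n m (setCell g p.1 p.2 0) ∧
    PendA g0 n m (setCell g p.1 p.2 0) (q ++ [p]) ∧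
    ZP n m g (setCell g p.1 p.2 0) ∧
    cellAt (setCell g p.1 p.2 0) p.1 p.2 = 0 ∧
    ones (setCell g p.1 p.2 0) + 1 = ones g ∧
    (∀ p' : Int × Int, inb n m p' → Marked g0 (setCell g p.1 p.2 0) p' →
      Marked g0 g p' ∨ p' = p) := by
  obtain ⟨hi0, hi1, hj0, hj1⟩ := hin
  have hg01 : cellAt g0 p.1 p.2 = 1 := by
    rcases hG p ⟨hi0, hi1, hj0, hj1⟩ with he | ⟨_, h0⟩
    · rw [← he]; exact hc
    · rw [hc] at h0; exact absurd h0 (by norm_num)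
  have hre : Reach g0 n m p := hr hg01
  have hself : cellAt (setCell g p.1 p.2 0) p.1 p.2 = 0 := by
    have := cellAt_setCell_self g0 g n m hok hsh p.1 p.2 0 ⟨hi0, hi1, hj0, hj1⟩
    simpa using this
  have hzp : ZP n m g (setCell g p.1 p.2 0) := by
    intro p' hp' h0
    by_cases hpe : p' = p
    · subst hpe; exact hself
    · rw [cellAt_setCell_ne g p.1 p.2 0 p'.1 p'.2 hi0 hj0 hp'.1 hp'.2.2.1
        (by intro hcon; exact hpe (Prod.ext_iff.mpr ⟨congrArg Prod.fst hcon, congrArg Prod.snd hcon⟩))]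
      exact h0
  refine ⟨hg01, Sh_setCell g0 g p.1 p.2 0 hi0 hj0 hsh, ?_, ?_, hzp, hself, ?_, ?_⟩
  · intro p' hp'
    by_cases hpe : p' = p
    · subst hpe; exact Or.inr ⟨hre, hself⟩
    · rcases hG p' hp' with he | ⟨hr', h0⟩
      · left
        rw [cellAt_setCell_ne g p.1 p.2 0 p'.1 p'.2 hi0 hj0 hp'.1 hp'.2.2.1
          (by intro hcon; exact hpe (Prod.ext_iff.mpr ⟨congrArg Prod.fst hcon, congrArg Prod.snd hcon⟩))]
        exact he
      · exact Or.inr ⟨hr', hzp p' hp' h0⟩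
  · intro p' hp'
    rcases List.mem_append.mp hp' with hq | hnewp
    · obtain ⟨ha, hb, hcc, hd⟩ := hP p' hq
      exact ⟨ha, hb, hzp p' ha hcc, hd⟩
    · have : p' = p := by simpa using hnewp
      subst this
      exact ⟨⟨hi0, hi1, hj0, hj1⟩, hg01, hself, hre⟩
  · exact ones_setCell g0 g n m hok hsh p.1 p.2 ⟨hi0, hi1, hj0, hj1⟩ hc
  · intro p' hp' hm
    by_cases hpe : p' = p
    · exact Or.inr hpe
    · left
      refine ⟨hm.1, ?_⟩
      rw [← hm.2]
      exact (cellAt_setCell_ne g p.1 p.2 0 p'.1 p'.2 hi0 hj0 hp'.1 hp'.2.2.1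
        (by intro hcon; exact hpe (Prod.ext_iff.mpr ⟨congrArg Prod.fst hcon, congrArg Prod.snd hcon⟩))).symm

lemma closedA_ext (g0 : List (List Int)) (n m : Int) (g g' : List (List Int))
    (q q' : List (Int × Int)) (hq : ∀ p ∈ q, p ∈ q') (hz : ZP n m g g')
    (hnew : ∀ p : Int × Int, inb n m p → Marked g0 g' p → Marked g0 g p ∨ p ∈ q') :
    ClosedA g0 n m g q → ClosedA g0 n m g' q' := by
  intro hC p hpin hm
  rcases hnew p hpin hm with hold | hq'
  · rcases hC p hpin hold with hmem | hnz
    · exact Or.inl (hq _ hmem)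
    · exact Or.inr (fun r hadj hrin hr1 => hz r hrin (hnz r hadj hrin hr1))
  · exact Or.inl hq'

-- one guarded seed attempt of A's first boundary loop (j ∈ {0, m-1})
lemma seedJ_main (g0 : List (List Int)) (n m : Int) (hok : ShapeOK g0 n m)
    (i j : Int) (hi : 0 ≤ i ∧ i < n) (hbj : j = 0 ∨ j = m - 1)
    (s : List (List Int) × List (Int × Int)) (h : InvA g0 n m s) :
    InvA g0 n m (if 0 ≤ j ∧ j < m ∧ cellAt s.1 i j = 1
        then (setCell s.1 i j 0, s.2 ++ [(i, j)]) else s) ∧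
    ZP n m s.1 (if 0 ≤ j ∧ j < m ∧ cellAt s.1 i j = 1
        then (setCell s.1 i j 0, s.2 ++ [(i, j)]) else s).1 ∧
    (∀ p ∈ s.2, p ∈ (if 0 ≤ j ∧ j < m ∧ cellAt s.1 i j = 1
        then (setCell s.1 i j 0, s.2 ++ [(i, j)]) else s).2) ∧
    (inb n m (i, j) → cellAt g0 i j = 1 → cellAt (if 0 ≤ j ∧ j < m ∧ cellAt s.1 i j = 1
        then (setCell s.1 i j 0, s.2 ++ [(i, j)]) else s).1 i j = 0) := by
  obtain ⟨hsh, hG, hP, hC⟩ := h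
  by_cases hcond : 0 ≤ j ∧ j < m ∧ cellAt s.1 i j = 1
  · obtain ⟨hj0, hj1, hc⟩ := hcond
    have hin : inb n m ((i, j) : Int × Int) := ⟨hi.1, hi.2, hj0, hj1⟩
    have hmk := mark_main g0 n m hok s.1 s.2 (i, j) hin hc
      (fun h1 => Reach.seed (i, j) hin (by rcases hbj with h | h <;> simp [bnd, h]) h1)
      hsh hG hP
    obtain ⟨hg01, hsh', hG', hP', hzp, hself, hones, hnew⟩ := hmk
    rw [if_pos ⟨hj0, hj1, hc⟩]
    refine ⟨⟨hsh', hG', hP', ?_⟩, hzp, fun p hp => List.mem_append_left _ hp, fun _ _ => hself⟩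
    exact closedA_ext g0 n m s.1 (setCell s.1 i j 0) s.2 (s.2 ++ [(i, j)])
      (fun p hp => List.mem_append_left _ hp) hzp
      (fun p' hp' hm => (hnew p' hp' hm).imp id (fun he => by rw [he]; exact List.mem_append_right _ (by simp)))
      hC
  · rw [if_neg hcond]
    refine ⟨⟨hsh, hG, hP, hC⟩, fun p _ h0 => h0, fun p hp => hp, ?_⟩
    intro hin h1
    have hne : cellAt s.1 i j ≠ 1 := by
      intro hcc; exact hcond ⟨hin.2.2.1, hin.2.2.2, hcc⟩
    rcases hG (i, j) hin with he | ⟨_, h0⟩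
    · exact absurd (by simpa using he.trans h1) hne
    · exact h0

-- one guarded seed attempt of A's second boundary loop (i ∈ {0, n-1})
lemma seedI_main (g0 : List (List Int)) (n m : Int) (hok : ShapeOK g0 n m)
    (i j : Int) (hj : 0 ≤ j ∧ j < m) (hbi : i = 0 ∨ i = n - 1)
    (s : List (List Int) × List (Int × Int)) (h : InvA g0 n m s) :
    InvA g0 n m (if 0 ≤ i ∧ i < n ∧ cellAt s.1 i j = 1
        then (setCell s.1 i j 0, s.2 ++ [(i, j)]) else s) ∧
    ZP n m s.1 (if 0 ≤ i ∧ i < n ∧ cellAt s.1 i j = 1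
        then (setCell s.1 i j 0, s.2 ++ [(i, j)]) else s).1 ∧
    (∀ p ∈ s.2, p ∈ (if 0 ≤ i ∧ i < n ∧ cellAt s.1 i j = 1
        then (setCell s.1 i j 0, s.2 ++ [(i, j)]) else s).2) ∧
    (inb n m (i, j) → cellAt g0 i j = 1 → cellAt (if 0 ≤ i ∧ i < n ∧ cellAt s.1 i j = 1
        then (setCell s.1 i j 0, s.2 ++ [(i, j)]) else s).1 i j = 0) := by
  obtain ⟨hsh, hG, hP, hC⟩ := h
  by_cases hcond : 0 ≤ i ∧ i < n ∧ cellAt s.1 i j = 1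
  · obtain ⟨hi0, hi1, hc⟩ := hcond
    have hin : inb n m ((i, j) : Int × Int) := ⟨hi0, hi1, hj.1, hj.2⟩
    have hmk := mark_main g0 n m hok s.1 s.2 (i, j) hin hc
      (fun h1 => Reach.seed (i, j) hin (by rcases hbi with h | h <;> simp [bnd, h]) h1)
      hsh hG hP
    obtain ⟨hg01, hsh', hG', hP', hzp, hself, hones, hnew⟩ := hmk
    rw [if_pos ⟨hi0, hi1, hc⟩]
    refine ⟨⟨hsh', hG', hP', ?_⟩, hzp, fun p hp => List.mem_append_left _ hp, fun _ _ => hself⟩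
    exact closedA_ext g0 n m s.1 (setCell s.1 i j 0) s.2 (s.2 ++ [(i, j)])
      (fun p hp => List.mem_append_left _ hp) hzp
      (fun p' hp' hm => (hnew p' hp' hm).imp id (fun he => by rw [he]; exact List.mem_append_right _ (by simp)))
      hC
  · rw [if_neg hcond]
    refine ⟨⟨hsh, hG, hP, hC⟩, fun p _ h0 => h0, fun p hp => hp, ?_⟩
    intro hin h1
    have hne : cellAt s.1 i j ≠ 1 := by
      intro hcc; exact hcond ⟨hin.1, hin.2.1, hcc⟩
    rcases hG (i, j) hin with he | ⟨_, h0⟩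
    · exact absurd (by simpa using he.trans h1) hne
    · exact h0

-- A's first seeding loop
lemma seedCols_fold (g0 : List (List Int)) (n m : Int) (hok : ShapeOK g0 n m) :
    ∀ l : List Int, (∀ i ∈ l, 0 ≤ i ∧ i < n) →
    ∀ s : List (List Int) × List (Int × Int), InvA g0 n m s →
    InvA g0 n m (l.foldl (seedColsA m) s) ∧
    ZP n m s.1 (l.foldl (seedColsA m) s).1 ∧
    (∀ p ∈ s.2, p ∈ (l.foldl (seedColsA m) s).2) ∧
    (∀ i ∈ l, ∀ j : Int, (j = 0 ∨ j = m - 1) → inb n m (i, j) → cellAt g0 i j = 1 →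
      cellAt (l.foldl (seedColsA m) s).1 i j = 0) := by
  intro l
  induction l with
  | nil => intro _ s h; exact ⟨h, fun p _ h0 => h0, fun p hp => hp, by simp⟩
  | cons i t ih =>
    intro hl s h
    have hi := hl i (List.mem_cons_self)
    have h1 := seedJ_main g0 n m hok i 0 hi (Or.inl rfl) s h
    set s1 := (if 0 ≤ (0:Int) ∧ (0:Int) < m ∧ cellAt s.1 i 0 = 1
        then (setCell s.1 i 0 0, s.2 ++ [(i, 0)]) else s) with hs1
    have h2 := seedJ_main g0 n m hok i (m - 1) hi (Or.inr rfl) s1 h1.1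
    set s2 := (if 0 ≤ m - 1 ∧ m - 1 < m ∧ cellAt s1.1 i (m - 1) = 1
        then (setCell s1.1 i (m - 1) 0, s1.2 ++ [(i, m - 1)]) else s1) with hs2
    have hstep : seedColsA m s i = s2 := by
      simp only [seedColsA, List.foldl, hs1, hs2]
    have ih' := ih (fun x hx => hl x (List.mem_cons_of_mem _ hx)) s2 h2.1
    rw [List.foldl_cons, hstep]
    refine ⟨ih'.1, ?_, ?_, ?_⟩
    · exact ZP_trans n m s.1 s2.1 _ (ZP_trans n m s.1 s1.1 s2.1 h1.2.1 h2.2.1) ih'.2.1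
    · exact fun p hp => ih'.2.2.1 p (h2.2.2.1 p (h1.2.2.1 p hp))
    · intro i' hi' j hbj hin hg1
      rcases List.mem_cons.mp hi' with rfl | ht
      · rcases hbj with rfl | rfl
        · exact ih'.2.1 (i', 0) hin (h2.2.1 (i', 0) hin (h1.2.2.2 hin hg1))
        · exact ih'.2.1 (i', m - 1) hin (h2.2.2.2 hin hg1)
      · exact ih'.2.2.2 i' ht j hbj hin hg1

-- A's second seeding loop
lemma seedRows_fold (g0 : List (List Int)) (n m : Int) (hok : ShapeOK g0 n m) :
    ∀ l : List Int, (∀ j ∈ l, 0 ≤ j ∧ j < m) →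
    ∀ s : List (List Int) × List (Int × Int), InvA g0 n m s →
    InvA g0 n m (l.foldl (seedRowsA n) s) ∧
    ZP n m s.1 (l.foldl (seedRowsA n) s).1 ∧
    (∀ p ∈ s.2, p ∈ (l.foldl (seedRowsA n) s).2) ∧
    (∀ j ∈ l, ∀ i : Int, (i = 0 ∨ i = n - 1) → inb n m (i, j) → cellAt g0 i j = 1 →
      cellAt (l.foldl (seedRowsA n) s).1 i j = 0) := by
  intro l
  induction l with
  | nil => intro _ s h; exact ⟨h, fun p _ h0 => h0, fun p hp => hp, by simp⟩
  | cons j t ih =>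
    intro hl s h
    have hj := hl j (List.mem_cons_self)
    have h1 := seedI_main g0 n m hok 0 j hj (Or.inl rfl) s h
    set s1 := (if 0 ≤ (0:Int) ∧ (0:Int) < n ∧ cellAt s.1 0 j = 1
        then (setCell s.1 0 j 0, s.2 ++ [((0:Int), j)]) else s) with hs1
    have h2 := seedI_main g0 n m hok (n - 1) j hj (Or.inr rfl) s1 h1.1
    set s2 := (if 0 ≤ n - 1 ∧ n - 1 < n ∧ cellAt s1.1 (n - 1) j = 1
        then (setCell s1.1 (n - 1) j 0, s1.2 ++ [(n - 1, j)]) else s1) with hs2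
    have hstep : seedRowsA n s j = s2 := by
      simp only [seedRowsA, List.foldl, hs1, hs2]
    have ih' := ih (fun x hx => hl x (List.mem_cons_of_mem _ hx)) s2 h2.1
    rw [List.foldl_cons, hstep]
    refine ⟨ih'.1, ?_, ?_, ?_⟩
    · exact ZP_trans n m s.1 s2.1 _ (ZP_trans n m s.1 s1.1 s2.1 h1.2.1 h2.2.1) ih'.2.1
    · exact fun p hp => ih'.2.2.1 p (h2.2.2.1 p (h1.2.2.1 p hp))
    · intro j' hj' i hbi hin hg1
      rcases List.mem_cons.mp hj' with rfl | ht
      · rcases hbi with rfl | rfl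
        · exact ih'.2.1 (0, j') hin (h2.2.1 (0, j') hin (h1.2.2.2 hin hg1))
        · exact ih'.2.1 (n - 1, j') hin (h2.2.2.2 hin hg1)
      · exact ih'.2.2.2 j' ht i hbi hin hg1

-- A's inner fold over the four directions
lemma stepA_fold (g0 : List (List Int)) (n m : Int) (hok : ShapeOK g0 n m)
    (x y : Int) (hr : Reach g0 n m (x, y)) :
    ∀ l : List (Int × Int), (∀ d ∈ l, d ∈ ([((1:Int), (0:Int)), (-1, 0), (0, 1), (0, -1)] : List (Int × Int))) →
    ∀ s : List (List Int) × List (Int × Int),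
    Sh g0 s.1 → GInv g0 n m s.1 → PendA g0 n m s.1 s.2 →
    Sh g0 (l.foldl (stepA n m x y) s).1 ∧
    GInv g0 n m (l.foldl (stepA n m x y) s).1 ∧
    PendA g0 n m (l.foldl (stepA n m x y) s).1 (l.foldl (stepA n m x y) s).2 ∧
    ZP n m s.1 (l.foldl (stepA n m x y) s).1 ∧
    (∀ p ∈ s.2, p ∈ (l.foldl (stepA n m x y) s).2) ∧
    ((l.foldl (stepA n m x y) s).2.length + ones (l.foldl (stepA n m x y) s).1
      ≤ s.2.length + ones s.1) ∧
    (∀ p : Int × Int, inb n m p → Marked g0 (l.foldl (stepA n m x y) s).1 p →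
      Marked g0 s.1 p ∨ p ∈ (l.foldl (stepA n m x y) s).2) ∧
    (∀ d ∈ l, inb n m (x + d.1, y + d.2) → cellAt g0 (x + d.1) (y + d.2) = 1 →
      cellAt (l.foldl (stepA n m x y) s).1 (x + d.1) (y + d.2) = 0) := by
  intro l
  induction l with
  | nil =>
    intro _ s hsh hG hP
    exact ⟨hsh, hG, hP, fun p _ h0 => h0, fun p hp => hp, le_refl _,
      fun p _ hm => Or.inl hm, by simp⟩
  | cons d t ih =>
    intro hl s hsh hG hP
    have hd := hl d (List.mem_cons_self)
    have hone : Sh g0 (stepA n m x y s d).1 ∧ GInv g0 n m (stepA n m x y s d).1 ∧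
        PendA g0 n m (stepA n m x y s d).1 (stepA n m x y s d).2 ∧
        ZP n m s.1 (stepA n m x y s d).1 ∧
        (∀ p ∈ s.2, p ∈ (stepA n m x y s d).2) ∧
        ((stepA n m x y s d).2.length + ones (stepA n m x y s d).1 ≤ s.2.length + ones s.1) ∧
        (∀ p : Int × Int, inb n m p → Marked g0 (stepA n m x y s d).1 p →
          Marked g0 s.1 p ∨ p ∈ (stepA n m x y s d).2) ∧
        (inb n m (x + d.1, y + d.2) → cellAt g0 (x + d.1) (y + d.2) = 1 →
          cellAt (stepA n m x y s d).1 (x + d.1) (y + d.2) = 0) := by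
      unfold stepA
      by_cases hcond : 0 ≤ x + d.1 ∧ x + d.1 < n ∧ 0 ≤ y + d.2 ∧ y + d.2 < m ∧
          cellAt s.1 (x + d.1) (y + d.2) = 1
      · obtain ⟨h1, h2, h3, h4, h5⟩ := hcond
        have hin : inb n m ((x + d.1, y + d.2) : Int × Int) := ⟨h1, h2, h3, h4⟩
        have hd' : d = ((1:Int), (0:Int)) ∨ d = (-1, 0) ∨ d = (0, 1) ∨ d = (0, -1) := by
          simpa using hd
        have hadj : adjc (x, y) (x + d.1, y + d.2) := by
          rcases hd' with rfl | rfl | rfl | rfl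
          · exact Or.inl (by simp)
          · exact Or.inr (Or.inl (by simp [Prod.ext_iff]; omega))
          · exact Or.inr (Or.inr (Or.inl (by simp)))
          · exact Or.inr (Or.inr (Or.inr (by simp [Prod.ext_iff]; omega)))
        have hmk := mark_main g0 n m hok s.1 s.2 (x + d.1, y + d.2) hin h5
          (fun hg1 => Reach.step (x, y) (x + d.1, y + d.2) hr hadj hin hg1) hsh hG hP
        obtain ⟨hg01, hsh', hG', hP', hzp, hself, hones, hnew⟩ := hmk
        simp only [if_pos (⟨h1, h2, h3, h4, h5⟩ : 0 ≤ x + d.1 ∧ x + d.1 < n ∧ 0 ≤ y + d.2 ∧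
          y + d.2 < m ∧ cellAt s.1 (x + d.1) (y + d.2) = 1)]
        refine ⟨hsh', hG', hP', hzp, fun p hp => List.mem_append_left _ hp, ?_, ?_, fun _ _ => hself⟩
        · have hones' : ones (setCell s.1 (x + d.1) (y + d.2) 0) + 1 = ones s.1 := by
            simpa using hones
          simp only [List.length_append, List.length_cons, List.length_nil]
          omega
        · intro p hp hm
          exact (hnew p hp hm).imp id (fun he => by rw [he]; exact List.mem_append_right _ (by simp))
      · simp only [if_neg hcond]
        refine ⟨hsh, hG, hP, fun p _ h0 => h0, fun p hp => hp, le_refl _,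
          fun p _ hm => Or.inl hm, ?_⟩
        intro hin h1
        have hne : cellAt s.1 (x + d.1) (y + d.2) ≠ 1 := by
          intro hcc; exact hcond ⟨hin.1, hin.2.1, hin.2.2.1, hin.2.2.2, hcc⟩
        rcases hG (x + d.1, y + d.2) hin with he | ⟨_, h0⟩
        · exact absurd (by simpa using he.trans h1) hne
        · exact h0
    have ih' := ih (fun e he => hl e (List.mem_cons_of_mem _ he)) (stepA n m x y s d)
      hone.1 hone.2.1 hone.2.2.1
    rw [List.foldl_cons]
    refine ⟨ih'.1, ih'.2.1, ih'.2.2.1, ?_, ?_, ?_, ?_, ?_⟩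
    · exact ZP_trans n m s.1 (stepA n m x y s d).1 _ hone.2.2.2.1 ih'.2.2.2.1
    · exact fun p hp => ih'.2.2.2.2.1 p (hone.2.2.2.2.1 p hp)
    · exact le_trans ih'.2.2.2.2.2.1 hone.2.2.2.2.2.1
    · intro p hp hm
      rcases ih'.2.2.2.2.2.2.1 p hp hm with hm1 | hmem
      · rcases hone.2.2.2.2.2.2.1 p hp hm1 with hm0 | hmem0
        · exact Or.inl hm0
        · exact Or.inr (ih'.2.2.2.2.1 p hmem0)
      · exact Or.inr hmem
    · intro e he hin h1
      rcases List.mem_cons.mp he with rfl | ht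
      · exact ih'.2.2.2.1 (x + e.1, y + e.2) hin (hone.2.2.2.2.2.2.2 hin h1)
      · exact ih'.2.2.2.2.2.2.2 e ht hin h1

-- A's BFS loop
lemma bfsA_main (g0 : List (List Int)) (n m : Int) (hok : ShapeOK g0 n m) :
    ∀ (fuel : Nat) (g : List (List Int)) (q : List (Int × Int)),
    q.length + ones g ≤ fuel → InvA g0 n m (g, q) → BndMk g0 n m g →
    Sh g0 (bfsA n m fuel g q) ∧ GInv g0 n m (bfsA n m fuel g q) ∧
    (∀ p : Int × Int, inb n m p → Marked g0 (bfsA n m fuel g q) p →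
      NbrsZero g0 n m (bfsA n m fuel g q) p) ∧
    BndMk g0 n m (bfsA n m fuel g q) := by
  intro fuel
  induction fuel with
  | zero =>
    intro g q hf h hB
    obtain ⟨hsh, hG, hP, hC⟩ := h
    have hq : q = [] := List.length_eq_zero_iff.mp (by omega)
    subst hq
    refine ⟨hsh, hG, ?_, hB⟩
    intro p hpin hm
    rcases hC p hpin hm with hmem | hnz
    · simp at hmem
    · exact hnz
  | succ fuel ih =>
    intro g q hf h hB
    obtain ⟨hsh, hG, hP, hC⟩ := h
    rcases q with _ | ⟨⟨x, y⟩, qs⟩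
    · refine ⟨hsh, hG, ?_, hB⟩
      intro p hpin hm
      rcases hC p hpin hm with hmem | hnz
      · simp at hmem
      · exact hnz
    · obtain ⟨hin, hg01, hc0, hre⟩ := hP (x, y) List.mem_cons_self
      have hPq : PendA g0 n m g qs := fun p hp => hP p (List.mem_cons_of_mem _ hp)
      have hfold := stepA_fold g0 n m hok x y hre
        [((1:Int), (0:Int)), (-1, 0), (0, 1), (0, -1)] (fun d hd => hd) (g, qs) hsh hG hPq
      obtain ⟨f1, f2, f3, f4, f5, f6, f7, f8⟩ := hfold
      have hnbr : NbrsZero g0 n m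
          ([((1:Int), (0:Int)), (-1, 0), (0, 1), (0, -1)].foldl (stepA n m x y) (g, qs)).1
          (x, y) := by
        intro r hadj hrin hr1
        rcases hadj with hr' | hr' | hr' | hr'
        · subst hr'
          have := f8 ((1:Int), (0:Int)) (by simp) (by simpa using hrin) (by simpa using hr1)
          simpa using this
        · subst hr'
          have := f8 ((-1:Int), (0:Int)) (by simp)
            (by simpa [show x + -1 = x - 1 by omega] using hrin)
            (by simpa [show x + -1 = x - 1 by omega] using hr1)
          simpa [show x + -1 = x - 1 by omega] using this
        · subst hr'
          have := f8 ((0:Int), (1:Int)) (by simp) (by simpa using hrin) (by simpa using hr1)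
          simpa using this
        · subst hr'
          have := f8 ((0:Int), (-1:Int)) (by simp)
            (by simpa [show y + -1 = y - 1 by omega] using hrin)
            (by simpa [show y + -1 = y - 1 by omega] using hr1)
          simpa [show y + -1 = y - 1 by omega] using this
      have hC' : ClosedA g0 n m
          ([((1:Int), (0:Int)), (-1, 0), (0, 1), (0, -1)].foldl (stepA n m x y) (g, qs)).1
          ([((1:Int), (0:Int)), (-1, 0), (0, 1), (0, -1)].foldl (stepA n m x y) (g, qs)).2 := by
        intro p hpin hm
        rcases f7 p hpin hm with hmold | hmem
        · rcases hC p hpin hmold with hmem0 | hnz0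
          · rcases List.mem_cons.mp hmem0 with rfl | htl
            · exact Or.inr hnbr
            · exact Or.inl (f5 p htl)
          · exact Or.inr (fun r ha hrin h1 => f4 r hrin (hnz0 r ha hrin h1))
        · exact Or.inl hmem
      have hB' : BndMk g0 n m
          ([((1:Int), (0:Int)), (-1, 0), (0, 1), (0, -1)].foldl (stepA n m x y) (g, qs)).1 :=
        fun p hpin hbnd h1 => f4 p hpin (hB p hpin hbnd h1)
      have hrec := ih ([((1:Int), (0:Int)), (-1, 0), (0, 1), (0, -1)].foldl (stepA n m x y) (g, qs)).1
        ([((1:Int), (0:Int)), (-1, 0), (0, 1), (0, -1)].foldl (stepA n m x y) (g, qs)).2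
        (by
          have f6' : ([((1:Int), (0:Int)), (-1, 0), (0, 1), (0, -1)].foldl (stepA n m x y) (g, qs)).2.length
              + ones ([((1:Int), (0:Int)), (-1, 0), (0, 1), (0, -1)].foldl (stepA n m x y) (g, qs)).1
              ≤ qs.length + ones g := by simpa using f6
          simp only [List.length_cons] at hf
          omega) ⟨f1, f2, f3, hC'⟩ hB'
      exact hrec

-- final characterisation from A's invariants
lemma final_char (g0 : List (List Int)) (n m : Int) (g : List (List Int))
    (hG : GInv g0 n m g) (hB : BndMk g0 n m g)
    (hC : ∀ p : Int × Int, inb n m p → Marked g0 g p → NbrsZero g0 n m g p) :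
    Final g0 n m g := by
  have hz : ∀ p : Int × Int, Reach g0 n m p → cellAt g p.1 p.2 = 0 := by
    intro p hre
    induction hre with
    | seed p h1 h2 h3 => exact hB p h1 h2 h3
    | step p q h ha h1 h3 ih =>
      have hp1 := reach_one g0 n m p h
      exact hC p hp1.2 ⟨hp1.1, ih⟩ q ha h1 h3
  intro p hpin
  refine ⟨fun hre => hz p hre, fun hnot => ?_⟩
  rcases hG p hpin with he | ⟨hre, _⟩
  · exact he
  · exact absurd hre hnot

lemma shape_of_pre (grid : List (List Int)) (n m : Int) (h : Pre_countIsolated grid n m) :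
    ShapeOK grid n m := by
  intro i hi0 hi1 hm
  rcases h with h | h | ⟨hn, hrows⟩
  · omega
  · omega
  · have hlen : i.toNat < grid.length := by omega
    exact ⟨hlen, hrows i.toNat (List.mem_range.mpr (by omega))⟩

-- ---- B-side proof apparatus ----
-- shape of the reach matrix: exactly n rows of m entries
def RSh (n m : Int) (r : List (List Bool)) : Prop :=
  r.length = n.toNat ∧ ∀ k : Nat, k < n.toNat → (r.getD k []).length = m.toNat

-- every reached in-range cell really is boundary-reachable
def SoundB (grid : List (List Int)) (n m : Int) (r : List (List Bool)) : Prop :=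
  ∀ p : Int × Int, inb n m p → rAt r p.1 p.2 = true → Reach grid n m p

-- the guard, read as a proposition
def GuardP (grid : List (List Int)) (n m : Int) (r : List (List Bool)) (i j : Int) : Prop :=
  cellAt grid i j = 1 ∧ rAt r i j = false ∧
    ((0 < i ∧ rAt r (i - 1) j = true) ∨ (i + 1 < n ∧ rAt r (i + 1) j = true) ∨
     (0 < j ∧ rAt r i (j - 1) = true) ∨ (j + 1 < m ∧ rAt r i (j + 1) = true))

lemma guardB_iff (grid : List (List Int)) (n m : Int) (r : List (List Bool)) (i j : Int) :
    guardB grid n m r i j = true ↔ GuardP grid n m r i j := by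
  unfold guardB GuardP
  simp [Bool.and_eq_true, Bool.or_eq_true, and_assoc, or_assoc]

def trueCount (r : List (List Bool)) : Nat :=
  (r.map (fun row => row.countP (fun b => b = true))).sum

lemma rAt_nonneg_eq (r : List (List Bool)) (i j : Int) (hi : 0 ≤ i) (hj : 0 ≤ j) :
    rAt r i j = (r.getD i.toNat []).getD j.toNat false := by
  simp [rAt, PySem.List.pyGetD_of_nonneg _ _ hi, PySem.List.pyGetD_of_nonneg _ _ hj]

lemma rSet_nonneg_eq (r : List (List Bool)) (i j : Int) (v : Bool) (hi : 0 ≤ i) (hj : 0 ≤ j) :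
    rSet r i j v = r.set i.toNat ((r.getD i.toNat []).set j.toNat v) := by
  simp [rSet, PySem.List.pySetD_of_nonneg _ _ hi, PySem.List.pySetD_of_nonneg _ _ hj,
    PySem.List.pyGetD_of_nonneg _ _ hi]

lemma RSh_rSet (n m : Int) (r : List (List Bool)) (i j : Int) (v : Bool)
    (hin : inb n m (i, j)) (hsh : RSh n m r) : RSh n m (rSet r i j v) := by
  obtain ⟨h1, h2, h3, h4⟩ := hin
  rw [rSet_nonneg_eq r i j v h1 h3]
  obtain ⟨hl, hr⟩ := hsh
  refine ⟨by simpa using hl, fun k hk => ?_⟩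
  by_cases hki : k = i.toNat
  · subst hki
    have hlt : i.toNat < r.length := by omega
    rw [getD_set_self_nat _ _ _ _ hlt, List.length_set]
    exact hr i.toNat hk
  · rw [getD_set_ne_nat _ _ _ _ _ (fun h => hki h.symm)]
    exact hr k hk

lemma rAt_rSet_self (n m : Int) (r : List (List Bool)) (i j : Int) (v : Bool)
    (hin : inb n m (i, j)) (hsh : RSh n m r) : rAt (rSet r i j v) i j = v := by
  obtain ⟨h1, h2, h3, h4⟩ := hin
  have hig : i.toNat < r.length := by rw [hsh.1]; omega
  have hjr : j.toNat < (r.getD i.toNat []).length := by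
    rw [hsh.2 i.toNat (by omega)]; omega
  rw [rAt_nonneg_eq _ _ _ h1 h3, rSet_nonneg_eq r i j v h1 h3,
    getD_set_self_nat _ _ _ _ hig, getD_set_self_nat _ _ _ _ hjr]

lemma rAt_rSet_ne (r : List (List Bool)) (i j : Int) (v : Bool) (i' j' : Int)
    (hi : 0 ≤ i) (hj : 0 ≤ j) (hi' : 0 ≤ i') (hj' : 0 ≤ j')
    (hne : (i', j') ≠ (i, j)) :
    rAt (rSet r i j v) i' j' = rAt r i' j' := by
  rw [rAt_nonneg_eq _ _ _ hi' hj', rAt_nonneg_eq _ _ _ hi' hj',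
    rSet_nonneg_eq r i j v hi hj]
  by_cases hii : i'.toNat = i.toNat
  · have hieq : i' = i := by omega
    have hjj : j.toNat ≠ j'.toNat := by
      intro hcon
      exact hne (by rw [hieq]; congr 1; omega)
    by_cases hlt : i.toNat < r.length
    · rw [hii, getD_set_self_nat _ _ _ _ hlt, getD_set_ne_nat _ _ _ _ _ hjj]
    · rw [List.set_eq_of_length_le (by omega)]
  · rw [getD_set_ne_nat _ _ _ _ _ (fun h => hii h.symm)]

lemma trueCount_rSet (n m : Int) (r : List (List Bool)) (i j : Int)
    (hin : inb n m (i, j)) (hsh : RSh n m r) (hf : rAt r i j = false) :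
    trueCount (rSet r i j true) = trueCount r + 1 := by
  obtain ⟨h1, h2, h3, h4⟩ := hin
  have hig : i.toNat < r.length := by rw [hsh.1]; omega
  have hjr : j.toNat < (r.getD i.toNat []).length := by
    rw [hsh.2 i.toNat (by omega)]; omega
  rw [rAt_nonneg_eq _ _ _ h1 h3] at hf
  rw [rSet_nonneg_eq r i j true h1 h3]
  unfold trueCount
  rw [List.map_set]
  have hmlen : i.toNat < (r.map (fun row => row.countP (fun b => decide (b = true)))).length := by
    simpa using hig
  have hsum := sum_set_nat (r.map (fun row => row.countP (fun b => decide (b = true)))) i.toNat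
    (((r.getD i.toNat []).set j.toNat true).countP (fun b => decide (b = true))) hmlen
  have hga : r.getD i.toNat [] = r[i.toNat] := List.getD_eq_getElem r [] hig
  have hcp : ((r.getD i.toNat []).set j.toNat true).countP (fun b => decide (b = true))
      = (r.getD i.toNat []).countP (fun b => decide (b = true)) + 1 := by
    rw [List.countP_set hjr]
    have hb : (r.getD i.toNat [])[j.toNat] = false := by
      rw [List.getD_eq_getElem (r.getD i.toNat []) false hjr] at hf; exact hf
    rw [hb]
    simp
  have hget : (r.map (fun row => row.countP (fun b => decide (b = true))))[i.toNat]
      = r[i.toNat].countP (fun b => decide (b = true)) := by simp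
  rw [hget, ← hga] at hsum
  omega

lemma sum_map_le_mul {α : Type} (l : List α) (f : α → Nat) (M : Nat)
    (h : ∀ x ∈ l, f x ≤ M) : (l.map f).sum ≤ l.length * M := by
  induction l with
  | nil => simp
  | cons a t ih =>
    have ha := h a List.mem_cons_self
    have ht := ih (fun x hx => h x (List.mem_cons_of_mem _ hx))
    simp only [List.map_cons, List.sum_cons, List.length_cons]
    calc f a + (t.map f).sum ≤ M + t.length * M := Nat.add_le_add ha ht
      _ = (t.length + 1) * M := by ring

lemma trueCount_le (n m : Int) (r : List (List Bool)) (hsh : RSh n m r) :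
    trueCount r ≤ n.toNat * m.toNat := by
  obtain ⟨hl, hr⟩ := hsh
  have hrow : ∀ row ∈ r, row.countP (fun b => b = true) ≤ m.toNat := by
    intro row hrow
    obtain ⟨k, hk, he⟩ := List.mem_iff_getElem.mp hrow
    have hlen : row.length = m.toNat := by
      have := hr k (by omega)
      rw [List.getD_eq_getElem r [] hk, he] at this
      exact this
    calc row.countP (fun b => b = true) ≤ row.length := List.countP_le_length
      _ = m.toNat := hlen
  calc trueCount r ≤ r.length * m.toNat :=
        sum_map_le_mul r (fun row => row.countP (fun b => b = true)) m.toNat hrow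
    _ = n.toNat * m.toNat := by rw [hl]

lemma RSh_seedMat (grid : List (List Int)) (n m : Int) : RSh n m (seedMat grid n m) := by
  unfold seedMat
  constructor
  · simp [PySem.List.length_pyRange_one]
  · intro k hk
    have hlen : k < ((PySem.List.pyRange 0 n 1).map (fun i =>
        (PySem.List.pyRange 0 m 1).map (fun j =>
          decide (cellAt grid i j = 1 ∧ (i = 0 ∨ i = n - 1 ∨ j = 0 ∨ j = m - 1))))).length := by
      simpa [PySem.List.length_pyRange_one] using hk
    rw [List.getD_eq_getElem _ [] hlen, List.getElem_map]
    simp [PySem.List.length_pyRange_one]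

lemma rAt_seedMat (grid : List (List Int)) (n m : Int) (i j : Int) (hin : inb n m (i, j)) :
    rAt (seedMat grid n m) i j
      = decide (cellAt grid i j = 1 ∧ (i = 0 ∨ i = n - 1 ∨ j = 0 ∨ j = m - 1)) := by
  obtain ⟨h1, h2, h3, h4⟩ := hin
  unfold rAt seedMat
  rw [PySem.List.pyGetD_map_pyRange_of_nonneg _ _ _ _ h1 h2,
    PySem.List.pyGetD_map_pyRange_of_nonneg _ _ _ _ h3 h4]

-- flattening the two nested sweep loops into one fold over the cell list
lemma foldl_nested {α β γ : Type} (f : γ → α → β → γ) (l1 : List α) (l2 : List β) (s : γ) :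
    l1.foldl (fun s a => l2.foldl (fun s b => f s a b) s) s
    = (l1.flatMap (fun a => l2.map (fun b => (a, b)))).foldl (fun s p => f s p.1 p.2) s := by
  induction l1 generalizing s with
  | nil => simp
  | cons a t ih => simp [List.foldl_append, List.foldl_map, ih]

def cells (n m : Int) : List (Int × Int) :=
  (PySem.List.pyRange 0 n 1).flatMap (fun i => (PySem.List.pyRange 0 m 1).map (fun j => (i, j)))

lemma mem_cells (n m : Int) (p : Int × Int) : p ∈ cells n m ↔ inb n m p := by
  unfold cells inb
  constructor
  · intro h
    obtain ⟨i, hi, hmem⟩ := List.mem_flatMap.mp h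
    obtain ⟨j, hj, he⟩ := List.mem_map.mp hmem
    obtain ⟨hi1, hi2⟩ := PySem.List.mem_pyRange_one.mp hi
    obtain ⟨hj1, hj2⟩ := PySem.List.mem_pyRange_one.mp hj
    rw [← he]
    exact ⟨hi1, hi2, hj1, hj2⟩
  · intro ⟨h1, h2, h3, h4⟩
    exact List.mem_flatMap.mpr ⟨p.1, PySem.List.mem_pyRange_one.mpr ⟨h1, h2⟩,
      List.mem_map.mpr ⟨p.2, PySem.List.mem_pyRange_one.mpr ⟨h3, h4⟩, rfl⟩⟩

lemma sweepB_eq_cells (grid : List (List Int)) (n m : Int) (r : List (List Bool)) :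
    sweepB grid n m r
      = (cells n m).foldl (fun s p => sweepCell grid n m s p.1 p.2) (r, false) := by
  unfold sweepB cells
  rw [foldl_nested (fun s i j => sweepCell grid n m s i j)]

-- the changed flag is monotone across a sweep
lemma sweep_changed_mono (grid : List (List Int)) (n m : Int) :
    ∀ (l : List (Int × Int)) (s : List (List Bool) × Bool), s.2 = true →
      (l.foldl (fun s p => sweepCell grid n m s p.1 p.2) s).2 = true := by
  intro l
  induction l with
  | nil => intro s h; exact h
  | cons c t ih =>
    intro s h
    rw [List.foldl_cons]
    apply ih
    unfold sweepCell
    by_cases hg : guardB grid n m s.1 c.1 c.2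
    · rw [if_pos hg]
    · rw [if_neg hg]; exact h

-- the heart of B: one sweep preserves shape and soundness, is pointwise monotone,
-- strictly grows the reach set when it reports a change, and is the identity
-- (with all guards refuted) when it does not
lemma sweep_fold (grid : List (List Int)) (n m : Int) :
    ∀ l : List (Int × Int), (∀ c ∈ l, inb n m c) →
    ∀ s : List (List Bool) × Bool, RSh n m s.1 → SoundB grid n m s.1 →
    RSh n m (l.foldl (fun s p => sweepCell grid n m s p.1 p.2) s).1 ∧
    SoundB grid n m (l.foldl (fun s p => sweepCell grid n m s p.1 p.2) s).1 ∧
    (∀ p : Int × Int, inb n m p → rAt s.1 p.1 p.2 = true →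
      rAt (l.foldl (fun s p => sweepCell grid n m s p.1 p.2) s).1 p.1 p.2 = true) ∧
    trueCount s.1 ≤ trueCount (l.foldl (fun s p => sweepCell grid n m s p.1 p.2) s).1 ∧
    ((l.foldl (fun s p => sweepCell grid n m s p.1 p.2) s).2 = true →
      s.2 = true ∨ trueCount s.1 + 1 ≤ trueCount (l.foldl (fun s p => sweepCell grid n m s p.1 p.2) s).1) ∧
    ((l.foldl (fun s p => sweepCell grid n m s p.1 p.2) s).2 = false →
      (l.foldl (fun s p => sweepCell grid n m s p.1 p.2) s).1 = s.1 ∧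
      ∀ c ∈ l, guardB grid n m s.1 c.1 c.2 = false) := by
  intro l
  induction l with
  | nil =>
    intro _ s hsh hsnd
    exact ⟨hsh, hsnd, fun p _ h => h, le_refl _, fun h => Or.inl h,
      fun _ => ⟨rfl, by simp⟩⟩
  | cons c t ih =>
    intro hl s hsh hsnd
    have hc := hl c List.mem_cons_self
    rw [List.foldl_cons]
    by_cases hg : guardB grid n m s.1 c.1 c.2 = true
    · -- the cell is marked reachable and changed is set
      obtain ⟨hcl, hcf, hnb⟩ := (guardB_iff grid n m s.1 c.1 c.2).mp hg
      have hcin : inb n m ((c.1, c.2) : Int × Int) := hc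
      have hreC : Reach grid n m c := by
        have hgoal : Reach grid n m ((c.1, c.2) : Int × Int) → Reach grid n m c := by
          intro h; exact h
        apply hgoal
        rcases hnb with ⟨hb, ht⟩ | ⟨hb, ht⟩ | ⟨hb, ht⟩ | ⟨hb, ht⟩
        · exact Reach.step (c.1 - 1, c.2) (c.1, c.2)
            (hsnd (c.1 - 1, c.2) ⟨by omega, by have := hc.2.1; omega, hc.2.2.1, hc.2.2.2⟩ ht)
            (Or.inl (Prod.ext_iff.mpr ⟨by simp, by simp⟩)) hcin hcl
        · exact Reach.step (c.1 + 1, c.2) (c.1, c.2)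
            (hsnd (c.1 + 1, c.2) ⟨by have := hc.1; omega, hb, hc.2.2.1, hc.2.2.2⟩ ht)
            (Or.inr (Or.inl (Prod.ext_iff.mpr ⟨by simp, by simp⟩))) hcin hcl
        · exact Reach.step (c.1, c.2 - 1) (c.1, c.2)
            (hsnd (c.1, c.2 - 1) ⟨hc.1, hc.2.1, by omega, by have := hc.2.2.2; omega⟩ ht)
            (Or.inr (Or.inr (Or.inl (Prod.ext_iff.mpr ⟨by simp, by simp⟩)))) hcin hcl
        · exact Reach.step (c.1, c.2 + 1) (c.1, c.2)
            (hsnd (c.1, c.2 + 1) ⟨hc.1, hc.2.1, by have := hc.2.2.1; omega, hb⟩ ht)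
            (Or.inr (Or.inr (Or.inr (Prod.ext_iff.mpr ⟨by simp, by simp⟩)))) hcin hcl
      have hstep : sweepCell grid n m s c.1 c.2 = (rSet s.1 c.1 c.2 true, true) := by
        unfold sweepCell
        rw [if_pos hg]
      have hsh' : RSh n m (rSet s.1 c.1 c.2 true) := RSh_rSet n m s.1 c.1 c.2 true hcin hsh
      have hsnd' : SoundB grid n m (rSet s.1 c.1 c.2 true) := by
        intro p hp htr
        by_cases hpe : p = ((c.1, c.2) : Int × Int)
        · subst hpe; exact hreC
        · rw [rAt_rSet_ne s.1 c.1 c.2 true p.1 p.2 hc.1 hc.2.2.1 hp.1 hp.2.2.1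
            (by intro hcon; exact hpe (Prod.ext_iff.mpr
              ⟨congrArg Prod.fst hcon, congrArg Prod.snd hcon⟩))] at htr
          exact hsnd p hp htr
      have hmono' : ∀ p : Int × Int, inb n m p → rAt s.1 p.1 p.2 = true →
          rAt (rSet s.1 c.1 c.2 true) p.1 p.2 = true := by
        intro p hp htr
        by_cases hpe : p = ((c.1, c.2) : Int × Int)
        · subst hpe
          exact rAt_rSet_self n m s.1 c.1 c.2 true hcin hsh
        · rw [rAt_rSet_ne s.1 c.1 c.2 true p.1 p.2 hc.1 hc.2.2.1 hp.1 hp.2.2.1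
            (by intro hcon; exact hpe (Prod.ext_iff.mpr
              ⟨congrArg Prod.fst hcon, congrArg Prod.snd hcon⟩))]
          exact htr
      have hcnt : trueCount (rSet s.1 c.1 c.2 true) = trueCount s.1 + 1 :=
        trueCount_rSet n m s.1 c.1 c.2 hcin hsh hcf
      have ih' := ih (fun x hx => hl x (List.mem_cons_of_mem _ hx))
        (rSet s.1 c.1 c.2 true, true) hsh' hsnd'
      rw [hstep]
      refine ⟨ih'.1, ih'.2.1, ?_, ?_, ?_, ?_⟩
      · intro p hp htr
        exact ih'.2.2.1 p hp (hmono' p hp htr)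
      · have h1 := ih'.2.2.2.1
        have h2 : trueCount ((rSet s.1 c.1 c.2 true, true) : List (List Bool) × Bool).1
            = trueCount s.1 + 1 := hcnt
        omega
      · intro _
        right
        have h1 := ih'.2.2.2.1
        have h2 : trueCount ((rSet s.1 c.1 c.2 true, true) : List (List Bool) × Bool).1
            = trueCount s.1 + 1 := hcnt
        omega
      · intro hfalse
        have := sweep_changed_mono grid n m t (rSet s.1 c.1 c.2 true, true) rfl
        rw [hfalse] at this
        exact absurd this (by simp)
    · have hstep : sweepCell grid n m s c.1 c.2 = s := by
        unfold sweepCell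
        rw [if_neg hg]
      have ih' := ih (fun x hx => hl x (List.mem_cons_of_mem _ hx)) s hsh hsnd
      rw [hstep]
      refine ⟨ih'.1, ih'.2.1, ih'.2.2.1, ih'.2.2.2.1, ih'.2.2.2.2.1, ?_⟩
      intro hfalse
      refine ⟨(ih'.2.2.2.2.2 hfalse).1, ?_⟩
      intro c' hc'
      rcases List.mem_cons.mp hc' with rfl | ht
      · exact Bool.not_eq_true _ ▸ eq_false_of_ne_true hg
      · exact (ih'.2.2.2.2.2 hfalse).2 c' ht

-- the while loop: runs to the fixpoint (fuel shown sufficient by counting)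
lemma loop_main (grid : List (List Int)) (n m : Int) :
    ∀ (fuel : Nat) (r : List (List Bool)), RSh n m r → SoundB grid n m r →
    n.toNat * m.toNat + 1 ≤ trueCount r + fuel →
    RSh n m (loopB grid n m fuel r) ∧ SoundB grid n m (loopB grid n m fuel r) ∧
    (∀ p : Int × Int, inb n m p → rAt r p.1 p.2 = true →
      rAt (loopB grid n m fuel r) p.1 p.2 = true) ∧
    (∀ c : Int × Int, inb n m c → guardB grid n m (loopB grid n m fuel r) c.1 c.2 = false) := by
  intro fuel
  induction fuel with
  | zero =>
    intro r hsh hsnd hb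
    exact absurd (trueCount_le n m r hsh) (by omega)
  | succ fuel ih =>
    intro r hsh hsnd hb
    have hcell : ∀ c ∈ cells n m, inb n m c := fun c hc => (mem_cells n m c).mp hc
    have hsw := sweep_fold grid n m (cells n m) hcell (r, false) hsh hsnd
    set t := (cells n m).foldl (fun s p => sweepCell grid n m s p.1 p.2)
      ((r, false) : List (List Bool) × Bool) with htd
    have hred : loopB grid n m (fuel + 1) r = if t.2 then loopB grid n m fuel t.1 else t.1 := by
      show (let s := sweepB grid n m r; if s.2 then loopB grid n m fuel s.1 else s.1)
        = if t.2 then loopB grid n m fuel t.1 else t.1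
      rw [sweepB_eq_cells, ← htd]
    cases hch : t.2 with
    | true =>
      have hinc : trueCount r + 1 ≤ trueCount t.1 := by
        rcases hsw.2.2.2.2.1 hch with hfalse | h
        · exact absurd hfalse (by simp)
        · exact h
      have ihr := ih t.1 hsw.1 hsw.2.1 (by omega)
      rw [hred, hch, if_pos rfl]
      exact ⟨ihr.1, ihr.2.1,
        fun p hp htr => ihr.2.2.1 p hp (hsw.2.2.1 p hp htr), ihr.2.2.2⟩
    | false =>
      have hfix := hsw.2.2.2.2.2 hch
      rw [hred, hch, if_neg (by simp), hfix.1]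
      exact ⟨hsh, hsnd, fun p hp h => h,
        fun c hc => hfix.2 c ((mem_cells n m c).mpr hc)⟩

-- completeness of B's fixpoint: it covers everything boundary-reachable
lemma completeB (grid : List (List Int)) (n m : Int) (r : List (List Bool))
    (hseed : ∀ p : Int × Int, inb n m p → bnd n m p → cellAt grid p.1 p.2 = 1 →
      rAt r p.1 p.2 = true)
    (hfix : ∀ c : Int × Int, inb n m c → guardB grid n m r c.1 c.2 = false) :
    ∀ p : Int × Int, Reach grid n m p → rAt r p.1 p.2 = true := by
  intro p hre
  induction hre with
  | seed p h1 h2 h3 => exact hseed p h1 h2 h3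
  | step p q h ha h1 h3 ih =>
    have hpin := (reach_one grid n m p h).2
    by_contra hfalse
    have hqf : rAt r q.1 q.2 = false := by
      cases h' : rAt r q.1 q.2 with
      | false => rfl
      | true => exact absurd h' hfalse
    have hgq : guardB grid n m r q.1 q.2 = true := by
      apply (guardB_iff grid n m r q.1 q.2).mpr
      refine ⟨h3, hqf, ?_⟩
      obtain ⟨b1, b2, b3, b4⟩ := hpin
      rcases ha with he | he | he | he
      · subst he
        exact Or.inl ⟨by simp; omega, by simpa using ih⟩
      · subst he
        exact Or.inr (Or.inl ⟨by simp; omega, by simpa using ih⟩)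
      · subst he
        exact Or.inr (Or.inr (Or.inl ⟨by simp; omega, by simpa using ih⟩))
      · subst he
        exact Or.inr (Or.inr (Or.inr ⟨by simp; omega, by simpa using ih⟩))
    rw [hfix q h1] at hgq
    exact absurd hgq (by simp)

-- the two counting double loops agree when the predicates agree on in-range cells
lemma count_eq (n m : Int) (gA grid : List (List Int)) (r : List (List Bool))
    (h : ∀ p : Int × Int, inb n m p →
      ((cellAt gA p.1 p.2 = 1) ↔ (cellAt grid p.1 p.2 = 1 ∧ rAt r p.1 p.2 = false))) :
    countLand n m gA
      = (PySem.List.pyRange 0 n 1).foldl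
          (fun acc i => (PySem.List.pyRange 0 m 1).foldl
            (fun acc j => if cellAt grid i j = 1 ∧ rAt r i j = false then acc + 1 else acc) acc) 0 := by
  unfold countLand
  apply PySem.List.foldl_congr_mem
  intro acc i hi
  apply PySem.List.foldl_congr_mem
  intro acc2 j hj
  have hin : inb n m ((i, j) : Int × Int) :=
    ⟨(PySem.List.mem_pyRange_one.mp hi).1, (PySem.List.mem_pyRange_one.mp hi).2,
     (PySem.List.mem_pyRange_one.mp hj).1, (PySem.List.mem_pyRange_one.mp hj).2⟩
  by_cases h1 : cellAt gA i j = 1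
  · rw [if_pos h1, if_pos ((h (i, j) hin).mp h1)]
  · rw [if_neg h1, if_neg (fun hc => h1 ((h (i, j) hin).mpr hc))]

-- ===== VERDICT (by name: the statement is the Claim_ definition above) =====
theorem countIsolated_spec : Claim_equal_countIsolated := by
  intro grid n m hdom hpre
  unfold Spec_countIsolated
  have hok := shape_of_pre grid n m hpre
  -- ---- A side ----
  have h0 : InvA grid n m (grid, ([] : List (Int × Int))) := by
    refine ⟨⟨rfl, fun k => rfl⟩, fun p _ => Or.inl rfl, fun p hp => absurd hp (by simp), ?_⟩
    intro p hpin hm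
    exact absurd (hm.1.symm.trans hm.2) (by norm_num)
  have hs1 := seedCols_fold grid n m hok (PySem.List.pyRange 0 n 1)
    (fun i hi => ⟨(PySem.List.mem_pyRange_one.mp hi).1, (PySem.List.mem_pyRange_one.mp hi).2⟩)
    (grid, []) h0
  set s1 := (PySem.List.pyRange 0 n 1).foldl (seedColsA m) (grid, ([] : List (Int × Int))) with hs1d
  have hs2 := seedRows_fold grid n m hok (PySem.List.pyRange 0 m 1)
    (fun j hj => ⟨(PySem.List.mem_pyRange_one.mp hj).1, (PySem.List.mem_pyRange_one.mp hj).2⟩)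
    s1 hs1.1
  set s2 := (PySem.List.pyRange 0 m 1).foldl (seedRowsA n) s1 with hs2d
  have hBnd : BndMk grid n m s2.1 := by
    intro p hpin hbnd h1
    obtain ⟨a1, a2, a3, a4⟩ := hpin
    rcases hbnd with hb | hb | hb | hb
    · have := hs2.2.2.2 p.2 (PySem.List.mem_pyRange_one.mpr ⟨a3, a4⟩) 0 (Or.inl rfl)
        ⟨le_refl 0, by omega, a3, a4⟩ (by rw [← hb]; exact h1)
      rw [hb]; exact this
    · have := hs2.2.2.2 p.2 (PySem.List.mem_pyRange_one.mpr ⟨a3, a4⟩) (n - 1) (Or.inr rfl)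
        ⟨by omega, by omega, a3, a4⟩ (by rw [← hb]; exact h1)
      rw [hb]; exact this
    · have := hs1.2.2.2 p.1 (PySem.List.mem_pyRange_one.mpr ⟨a1, a2⟩) 0 (Or.inl rfl)
        ⟨a1, a2, le_refl 0, by omega⟩ (by rw [← hb]; exact h1)
      rw [hb]
      exact hs2.2.1 (p.1, 0) ⟨a1, a2, le_refl 0, by omega⟩ this
    · have := hs1.2.2.2 p.1 (PySem.List.mem_pyRange_one.mpr ⟨a1, a2⟩) (m - 1) (Or.inr rfl)
        ⟨a1, a2, by omega, by omega⟩ (by rw [← hb]; exact h1)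
      rw [hb]
      exact hs2.2.1 (p.1, m - 1) ⟨a1, a2, by omega, by omega⟩ this
  have hInv2 : InvA grid n m (s2.1, s2.2) := by rw [Prod.mk.eta]; exact hs2.1
  have hbfs := bfsA_main grid n m hok (s2.2.length + ones s2.1) s2.1 s2.2 (le_refl _) hInv2 hBnd
  have hFinA := final_char grid n m _ hbfs.2.1 hbfs.2.2.2 hbfs.2.2.1
  -- ---- B side ----
  have hshs := RSh_seedMat grid n m
  have hsnds : SoundB grid n m (seedMat grid n m) := by
    intro p hp htrue
    rw [rAt_seedMat grid n m p.1 p.2 (by exact hp)] at htrue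
    have := of_decide_eq_true htrue
    exact Reach.seed p hp (this.2.imp id (fun h => h.imp id id)) this.1
  have hloop := loop_main grid n m (n.toNat * m.toNat + 1) (seedMat grid n m) hshs hsnds
    (by omega)
  set rf := loopB grid n m (n.toNat * m.toNat + 1) (seedMat grid n m) with hrfd
  have hseedrf : ∀ p : Int × Int, inb n m p → bnd n m p → cellAt grid p.1 p.2 = 1 →
      rAt rf p.1 p.2 = true := by
    intro p hp hb h1
    apply hloop.2.2.1 p hp
    rw [rAt_seedMat grid n m p.1 p.2 (by exact hp)]
    exact decide_eq_true ⟨h1, hb.imp id (fun h => h.imp id (fun h => h))⟩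
  have hcomp := completeB grid n m rf hseedrf hloop.2.2.2
  -- ---- the counts agree pointwise ----
  have hA : countIsolated grid n m = countLand n m (bfsA n m (s2.2.length + ones s2.1) s2.1 s2.2) := rfl
  have hB : countIsolated_alt grid n m
      = (PySem.List.pyRange 0 n 1).foldl
          (fun acc i => (PySem.List.pyRange 0 m 1).foldl
            (fun acc j => if cellAt grid i j = 1 ∧ rAt rf i j = false then acc + 1 else acc) acc) 0 := rfl
  rw [hA, hB]
  apply count_eq
  intro p hpin
  rcases Classical.em (Reach grid n m p) with hre | hre
  · constructor
    · intro h1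
      rw [(hFinA p hpin).1 hre] at h1
      exact absurd h1 (by norm_num)
    · intro ⟨_, hf⟩
      rw [hcomp p hre] at hf
      exact absurd hf (by simp)
  · have hfA := (hFinA p hpin).2 hre
    have hff : rAt rf p.1 p.2 = false := by
      cases hcl : rAt rf p.1 p.2 with
      | false => rfl
      | true => exact absurd (hloop.2.1 p hpin hcl) hre
    rw [hfA, hff]
    simp
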